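-- pv_equiv track=rewrite | github.com/ElAshira/NSI2024-main | Mock Exams/02.py | positif
-- ===== SOURCE A (Python) =====
-- def positif(pile):
--     pile_1 = list(pile)
--     pile_2 = []
--
--     while pile_1 != []:
--         x = pile_1.pop()
--         if x >= 0:
--             pile_2.append(x)
--
--     pile.clear()
--     while pile_2 != []:
--         x = pile_2.pop()
--         pile.append(x)
--
--     return pile
-- ===== SOURCE B (Python) =====
-- def positif(pile):
--     # In-place write-pointer compaction: one pass, no auxiliary stacks.
--     w = 0
--     for x in pile:
--         if x >= 0:
--             pile[w] = x
--             w += 1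
--     del pile[w:]
--     return pile
-- ===== Notes on version B (the rewrite author's own statement) =====
-- stated objective: simpler
-- what changed: Replaces the two auxiliary stacks with their double pop/append reversal by a single in-place pass keeping a write index w (pile[w]=x for each x>=0, then del pile[w:]).
import Mathlib
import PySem

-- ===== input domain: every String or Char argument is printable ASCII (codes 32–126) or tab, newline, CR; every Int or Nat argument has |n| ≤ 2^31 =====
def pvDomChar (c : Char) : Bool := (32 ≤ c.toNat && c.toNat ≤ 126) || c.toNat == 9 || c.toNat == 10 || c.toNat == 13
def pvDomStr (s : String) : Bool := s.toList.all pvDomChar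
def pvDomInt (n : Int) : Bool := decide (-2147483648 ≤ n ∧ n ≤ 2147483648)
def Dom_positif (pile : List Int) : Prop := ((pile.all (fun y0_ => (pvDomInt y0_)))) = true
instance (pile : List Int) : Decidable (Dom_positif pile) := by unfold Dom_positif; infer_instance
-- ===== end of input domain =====

-- B replaces A's two auxiliary pop/append stacks with a single in-place write-index pass (simpler); both mutate `pile` in place to the same final content, the theorems are about the return value.


-- ===== PORT A =====
-- while pile_1 != []: x = pile_1.pop(); if x >= 0: pile_2.append(x)
-- pop() takes the last element, so the loop consumes pile_1 from the end: we
-- recurse over pile_1.reverse, appending to pile_2 in the same order.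
def positifLoop1 : List Int → List Int → List Int
  | [], pile_2 => pile_2
  | x :: rest, pile_2 => positifLoop1 rest (if x ≥ 0 then pile_2 ++ [x] else pile_2)

-- while pile_2 != []: x = pile_2.pop(); pile.append(x)  (again pop from the end)
def positifLoop2 : List Int → List Int → List Int
  | [], pile => pile
  | x :: rest, pile => positifLoop2 rest (pile ++ [x])

def positif (pile : List Int) : List Int :=
  let pile_1 := pile
  let pile_2 := positifLoop1 pile_1.reverse []
  positifLoop2 pile_2.reverse []

-- ===== PORT B =====
-- write-pointer compaction: state (buf, w); 'pile[w] = x; w += 1' for x >= 0,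
-- then 'del pile[w:]' is buf.take w.
def positif_alt (pile : List Int) : List Int :=
  let st := pile.foldl (fun (s : List Int × Nat) x =>
    if x ≥ 0 then (s.1.set s.2 x, s.2 + 1) else s) (pile, 0)
  st.1.take st.2

-- ===== PRECONDITION & SPEC =====
def Spec_positif (pile : List Int) (out : List Int) : Prop := out = positif_alt pile
instance (pile : List Int) (out : List Int) : Decidable (Spec_positif pile out) := by unfold Spec_positif; infer_instance

-- ===== CLAIM (what is proved, stated in full; the proofs are below) =====
def Claim_equal_positif : Prop := ∀ (pile : List Int), Dom_positif pile → Spec_positif pile (positif pile)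

-- ===== LEMMAS AND PROOFS =====

theorem pvLoop1_eq (l acc : List Int) :
    positifLoop1 l acc = acc ++ l.filter (fun x => decide (x ≥ 0)) := by
  induction l generalizing acc with
  | nil => simp [positifLoop1]
  | cons x rest ih =>
    by_cases h : x ≥ 0
    · simp [positifLoop1, h, ih]
    · simp [positifLoop1, h, ih]

theorem pvLoop2_eq (l acc : List Int) : positifLoop2 l acc = acc ++ l := by
  induction l generalizing acc with
  | nil => simp [positifLoop2]
  | cons x rest ih => simp [positifLoop2, ih]

theorem pvA_eq (pile : List Int) :
    positif pile = pile.filter (fun x => decide (x ≥ 0)) := by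
  simp [positif, pvLoop1_eq, pvLoop2_eq, ← List.filter_reverse]

theorem pvAlt_loop (todo fil rest : List Int) (h : todo.length ≤ rest.length) :
    (let st := todo.foldl (fun (s : List Int × Nat) x =>
        if x ≥ 0 then (s.1.set s.2 x, s.2 + 1) else s) (fil ++ rest, fil.length)
     st.1.take st.2) = fil ++ todo.filter (fun x => decide (x ≥ 0)) := by
  induction todo generalizing fil rest with
  | nil => simp
  | cons x todo ih =>
    cases rest with
    | nil => simp at h
    | cons r rs =>
      simp only [List.foldl_cons, List.filter_cons]
      by_cases hx : x ≥ 0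
      · have hset : (fil ++ r :: rs).set fil.length x = (fil ++ [x]) ++ rs := by
          rw [List.set_append_right _ _ (le_refl _)]
          simp
        have := ih (fil ++ [x]) rs (by simpa using h)
        simp only [hset]
        simp only [List.length_append, List.length_cons, List.length_nil] at this ⊢
        simpa [hx, List.append_assoc] using this
      · have := ih fil (r :: rs) (by simp at h ⊢; omega)
        simpa [hx] using this

theorem pvAlt_eq (pile : List Int) :
    positif_alt pile = pile.filter (fun x => decide (x ≥ 0)) := by
  have := pvAlt_loop pile [] pile (le_refl _)
  simpa [positif_alt] using this

-- ===== VERDICT (by name: the statement is the Claim_ definition above) =====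
theorem positif_spec : Claim_equal_positif := by
  intro pile _
  unfold Spec_positif
  rw [pvA_eq, pvAlt_eq]
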